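-- pv_equiv track=rewrite | github.com/S-Christensen/cartographersStudy | spring/midgameEvaluation.py | borderlands_progress
-- ===== SOURCE A (Python) =====
-- def borderlands_progress(grid):
--     def is_filled(line):
--         return all(cell not in ("0", "Ruins") for cell in line)
--
--     rows = len(grid)
--     cols = len(grid[0])
--
--     row_count = sum(1 for r in range(rows) if is_filled(grid[r]))
--     col_count = sum(1 for c in range(cols) if is_filled([grid[r][c] for r in range(rows)]))
--
--     return (row_count + col_count) * 6
-- ===== SOURCE B (Python) =====
-- def borderlands_progress(grid):
--     cols = len(grid[0])
--     row_count = 0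
--     bad_cols = set()
--     for row in grid:
--         if all(cell not in ("0", "Ruins") for cell in row):
--             row_count += 1
--         for c in range(cols):
--             if row[c] in ("0", "Ruins"):
--                 bad_cols.add(c)
--     return (row_count + (cols - len(bad_cols))) * 6
-- ===== Notes on version B (the rewrite author's own statement) =====
-- stated objective: alternative
-- what changed: Single sweep over the rows keeping a row counter and a set of not-fully-filled columns, instead of a second pass that materialises each column; col_count becomes cols - len(bad_cols).
import Mathlib
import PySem

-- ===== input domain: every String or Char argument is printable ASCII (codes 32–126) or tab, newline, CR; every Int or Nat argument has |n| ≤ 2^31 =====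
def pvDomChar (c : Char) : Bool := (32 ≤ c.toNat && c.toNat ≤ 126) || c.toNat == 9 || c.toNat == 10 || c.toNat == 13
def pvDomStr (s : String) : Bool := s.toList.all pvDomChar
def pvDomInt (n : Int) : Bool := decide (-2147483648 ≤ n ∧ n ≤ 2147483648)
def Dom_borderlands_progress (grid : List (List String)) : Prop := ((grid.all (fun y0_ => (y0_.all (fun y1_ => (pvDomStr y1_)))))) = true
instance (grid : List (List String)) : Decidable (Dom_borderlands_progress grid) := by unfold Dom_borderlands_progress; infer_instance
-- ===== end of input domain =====

-- B: single sweep keeping a row counter and a set of not-fully-filled columns (alternative decomposition; no transposed column lists).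


-- ===== PORT A =====
-- helper: Python's is_filled(line) = all(cell not in ("0", "Ruins") for cell in line)
def pvIsFilled (line : List String) : Bool :=
  line.all (fun cell => !(cell == "0" || cell == "Ruins"))

def borderlands_progress (grid : List (List String)) : Int :=
  let rows := grid.length
  let cols := (grid.headD []).length          -- len(grid[0]); Pre_ excludes the empty grid (IndexError)
  let row_count := ((List.range rows).filter (fun r => pvIsFilled (grid.getD r []))).length
  -- column pass: materialise [grid[r][c] for r in range(rows)]; Pre_ guarantees every index is in range
  let col_count := ((List.range cols).filter
      (fun c => pvIsFilled ((List.range rows).map (fun r => (grid.getD r []).getD c "")))).length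
  ((row_count : Int) + (col_count : Int)) * 6

-- ===== PORT B =====
def pvEmptyCell (cell : String) : Bool := cell == "0" || cell == "Ruins"

def borderlands_progress_alt (grid : List (List String)) : Int :=
  let cols := (grid.headD []).length          -- len(grid[0]); Pre_ excludes the empty grid (IndexError)
  let st := grid.foldl (fun (st : Nat × PySem.Set Nat) row =>
      (if row.all (fun cell => !pvEmptyCell cell) then st.1 + 1 else st.1,
       (List.range cols).foldl (fun b c =>
          if pvEmptyCell (row.getD c "") then PySem.Set.add b c else b) st.2))   -- row[c]; Pre_ keeps c in range
    (0, PySem.Set.empty)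
  ((st.1 : Int) + ((cols : Int) - PySem.Set.len st.2)) * 6

-- ===== PRECONDITION & SPEC =====
-- Pre_ excludes exactly the inputs on which the Python A raises IndexError: the empty grid
-- (len(grid[0])) and ragged grids with some row shorter than grid[0] (grid[r][c] in the column pass).
def Pre_borderlands_progress (grid : List (List String)) : Prop :=
  grid ≠ [] ∧ ∀ row ∈ grid, (grid.headD []).length ≤ row.length
instance (grid : List (List String)) : Decidable (Pre_borderlands_progress grid) := by
  unfold Pre_borderlands_progress; infer_instance

def pvWitness_borderlands_progress : List (List String) := [["a", "0"], ["b", "c"]]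

def Spec_borderlands_progress (grid : List (List String)) (out : Int) : Prop := out = borderlands_progress_alt grid
instance (grid : List (List String)) (out : Int) : Decidable (Spec_borderlands_progress grid out) := by unfold Spec_borderlands_progress; infer_instance

-- ===== CLAIM (what is proved, stated in full; the proofs are below) =====
def Claim_equal_borderlands_progress : Prop := ∀ (grid : List (List String)), Dom_borderlands_progress grid → Pre_borderlands_progress grid → Spec_borderlands_progress grid (borderlands_progress grid)

-- ===== LEMMAS AND PROOFS =====

-- B's pair-fold splits into two independent folds
theorem pv_fold_split (grid : List (List String)) (cols : Nat) (a : Nat) (b : PySem.Set Nat) :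
    grid.foldl (fun (st : Nat × PySem.Set Nat) row =>
      (if row.all (fun cell => !pvEmptyCell cell) then st.1 + 1 else st.1,
       (List.range cols).foldl (fun b c =>
          if pvEmptyCell (row.getD c "") then PySem.Set.add b c else b) st.2)) (a, b)
    = (grid.foldl (fun acc row => if row.all (fun cell => !pvEmptyCell cell) then acc + 1 else acc) a,
       grid.foldl (fun s row => (List.range cols).foldl (fun b c =>
          if pvEmptyCell (row.getD c "") then PySem.Set.add b c else b) s) b) := by
  induction grid generalizing a b with
  | nil => rfl
  | cons hd t ih =>
      simp only [List.foldl_cons]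
      rw [ih]

-- B's running row counter counts the filled rows
theorem pv_rowcount (grid : List (List String)) (a : Nat) :
    grid.foldl (fun acc row => if row.all (fun cell => !pvEmptyCell cell) then acc + 1 else acc) a
    = a + grid.countP pvIsFilled := by
  induction grid generalizing a with
  | nil => simp
  | cons hd t ih =>
      rw [List.foldl_cons, ih, List.countP_cons]
      have h1 : (hd.all fun cell => !pvEmptyCell cell) = pvIsFilled hd := rfl
      rw [h1]
      by_cases hf : pvIsFilled hd = true
      · rw [if_pos hf, if_pos hf]; omega
      · rw [if_neg hf, if_neg hf]; omega

-- A's row_count over indices is the countP over the rows themselves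
theorem pv_range_filter (grid : List (List String)) :
    ((List.range grid.length).filter (fun r => pvIsFilled (grid.getD r []))).length
    = grid.countP pvIsFilled := by
  have hmapg : (List.range grid.length).map (fun r => grid.getD r []) = grid := by
    apply List.ext_getElem
    · simp
    · intro i h1 h2
      simp [List.getElem?_eq_getElem h2]
  rw [← List.countP_eq_length_filter,
      show (fun r => pvIsFilled (grid.getD r [])) = pvIsFilled ∘ (fun r => grid.getD r []) from rfl,
      ← List.countP_map, hmapg]

-- membership in the inner (one-row) column-marking fold
theorem pv_bad_mem_inner (row : List String) (c : Nat) (l : List Nat) (b : PySem.Set Nat) :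
    c ∈ l.foldl (fun b c =>
        if pvEmptyCell (row.getD c "") then PySem.Set.add b c else b) b
    ↔ c ∈ b ∨ (c ∈ l ∧ pvEmptyCell (row.getD c "")) := by
  induction l generalizing b with
  | nil => simp
  | cons x xs ihx =>
      rw [List.foldl_cons, ihx]
      by_cases hx : pvEmptyCell (row.getD x "") = true
      · simp only [hx, if_true, PySem.Set.mem_add, List.mem_cons]
        constructor
        · rintro ((hb | rfl) | h)
          · exact Or.inl hb
          · exact Or.inr ⟨Or.inl rfl, hx⟩
          · exact Or.inr ⟨Or.inr h.1, h.2⟩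
        · rintro (hb | ⟨(rfl | hm), he⟩)
          · exact Or.inl (Or.inl hb)
          · exact Or.inl (Or.inr rfl)
          · exact Or.inr ⟨hm, he⟩
      · rw [if_neg hx]
        simp only [List.mem_cons]
        constructor
        · rintro (hb | h)
          · exact Or.inl hb
          · exact Or.inr ⟨Or.inr h.1, h.2⟩
        · rintro (hb | ⟨(rfl | hm), he⟩)
          · exact Or.inl hb
          · exact absurd he hx
          · exact Or.inr ⟨hm, he⟩

-- membership in the bad-column set after the whole sweep
theorem pv_bad_mem (grid : List (List String)) (cols : Nat) (b : PySem.Set Nat) (c : Nat) :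
    c ∈ grid.foldl (fun s row => (List.range cols).foldl (fun b c =>
          if pvEmptyCell (row.getD c "") then PySem.Set.add b c else b) s) b
    ↔ c ∈ b ∨ (c < cols ∧ ∃ row ∈ grid, pvEmptyCell (row.getD c "")) := by
  induction grid generalizing b with
  | nil => simp
  | cons hd t ih =>
      rw [List.foldl_cons, ih]
      rw [show (∀ (b : PySem.Set Nat), c ∈ (List.range cols).foldl (fun b c =>
            if pvEmptyCell (hd.getD c "") then PySem.Set.add b c else b) b
          ↔ c ∈ b ∨ (c ∈ List.range cols ∧ pvEmptyCell (hd.getD c ""))) from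
          fun b => pv_bad_mem_inner hd c (List.range cols) b]
      simp only [List.mem_range, List.mem_cons]
      constructor
      · rintro ((hb | h) | ⟨hc, row, hr, he⟩)
        · exact Or.inl hb
        · exact Or.inr ⟨h.1, hd, Or.inl rfl, h.2⟩
        · exact Or.inr ⟨hc, row, Or.inr hr, he⟩
      · rintro (hb | ⟨hc, row, (rfl | hr), he⟩)
        · exact Or.inl (Or.inl hb)
        · exact Or.inl (Or.inr ⟨hc, he⟩)
        · exact Or.inr ⟨hc, row, hr, he⟩

-- the sweep preserves Nodup of the set
theorem pv_bad_nodup (grid : List (List String)) (cols : Nat) (b : PySem.Set Nat)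
    (hb : b.Nodup) :
    (grid.foldl (fun s row => (List.range cols).foldl (fun b c =>
          if pvEmptyCell (row.getD c "") then PySem.Set.add b c else b) s) b).Nodup := by
  induction grid generalizing b with
  | nil => exact hb
  | cons hd t ih =>
      rw [List.foldl_cons]
      apply ih
      have hinner : ∀ (l : List Nat) (b : PySem.Set Nat), b.Nodup →
          (l.foldl (fun b c =>
            if pvEmptyCell (hd.getD c "") then PySem.Set.add b c else b) b).Nodup := by
        intro l
        induction l with
        | nil => intro b hb; exact hb
        | cons x xs ihx =>
            intro b hb
            rw [List.foldl_cons]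
            apply ihx
            split_ifs
            · exact PySem.Set.nodup_add b x hb
            · exact hb
      exact hinner _ _ hb

theorem pv_range_all (grid : List (List String)) (g : List String → Bool) :
    ((List.range grid.length).all (fun r => g (grid.getD r []))) = grid.all g := by
  rw [Bool.eq_iff_iff]
  simp only [List.all_eq_true, List.mem_range]
  constructor
  · intro h x hx
    obtain ⟨i, hi, rfl⟩ := List.mem_iff_getElem.mp hx
    have hh := h i hi
    simpa [List.getD_eq_getElem?_getD, List.getElem?_eq_getElem hi] using hh
  · intro h r hr
    simp only [List.getD_eq_getElem?_getD, List.getElem?_eq_getElem hr, Option.getD_some]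
    exact h _ (List.getElem_mem hr)

theorem pv_countP_split (l : List Nat) (p : Nat → Bool) :
    l.countP p + l.countP (fun a => !p a) = l.length := by
  induction l with
  | nil => simp
  | cons x xs ih =>
      rw [List.countP_cons, List.countP_cons, List.length_cons]
      by_cases hx : p x = true <;> simp [hx] <;> omega

theorem pv_main (grid : List (List String)) :
    borderlands_progress grid = borderlands_progress_alt grid := by
  simp only [borderlands_progress, borderlands_progress_alt]
  rw [pv_fold_split]
  dsimp only
  rw [pv_rowcount, pv_range_filter, Nat.zero_add]
  congr 1
  set cols := (grid.headD []).length with hcols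
  set bad := grid.foldl (fun s row => (List.range cols).foldl (fun b c =>
        if pvEmptyCell (row.getD c "") then PySem.Set.add b c else b) s) (PySem.Set.empty) with hbad
  have hnd : bad.Nodup := pv_bad_nodup grid cols PySem.Set.empty (by simp [PySem.Set.empty])
  have hperm : bad.Perm ((List.range cols).filter
      (fun c => grid.any (fun row => pvEmptyCell (row.getD c "")))) := by
    apply (List.perm_ext_iff_of_nodup hnd (List.Nodup.filter _ List.nodup_range)).mpr
    intro c
    rw [hbad, pv_bad_mem, List.mem_filter, List.mem_range]
    simp [PySem.Set.empty, List.any_eq_true]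
  have hlenbad : PySem.Set.len bad = (((List.range cols).filter
      (fun c => grid.any (fun row => pvEmptyCell (row.getD c "")))).length : Int) := by
    simp [PySem.Set.len, hperm.length_eq]
  have hcol : ∀ c : Nat,
      pvIsFilled ((List.range grid.length).map (fun r => (grid.getD r []).getD c ""))
      = !(grid.any (fun row => pvEmptyCell (row.getD c ""))) := by
    intro c
    have h1 : pvIsFilled ((List.range grid.length).map (fun r => (grid.getD r []).getD c ""))
        = (List.range grid.length).all (fun r => !pvEmptyCell ((grid.getD r []).getD c "")) := by
      simp [pvIsFilled, pvEmptyCell, List.all_map, Function.comp_def]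
    rw [h1, pv_range_all grid (fun row => !pvEmptyCell (row.getD c ""))]
    simp [List.all_eq_not_any_not]
  have hfilter : ((List.range cols).filter
      (fun c => pvIsFilled ((List.range grid.length).map (fun r => (grid.getD r []).getD c "")))).length
      = (List.range cols).countP
      (fun c => !(grid.any (fun row => pvEmptyCell (row.getD c "")))) := by
    rw [← List.countP_eq_length_filter]
    apply List.countP_congr
    intro c _
    rw [hcol c]
  have hsplit := pv_countP_split (List.range cols)
      (fun c => grid.any (fun row => pvEmptyCell (row.getD c "")))
  rw [← List.countP_eq_length_filter] at hlenbad
  simp only [List.length_range] at hsplit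
  rw [hfilter, hlenbad]
  omega

-- ===== VERDICT (by name: the statement is the Claim_ definition above) =====
theorem borderlands_progress_spec : Claim_equal_borderlands_progress := by
  intro grid _ _
  exact pv_main grid
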